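-- pv_equiv track=rewrite | github.com/Rohit30Confluence/phishing-log-detector | phishing_detector.py | detect_phishing
-- ===== SOURCE A (Python) =====
-- def detect_phishing(parsed_logs, blacklisted_ips, suspicious_urls):
--     detected = []
--     for entry in parsed_logs:
--         ip = entry.get("ip", "")
--         url = entry.get("url", "")
--
--         reasons = []
--         if ip in blacklisted_ips:
--             reasons.append("Blacklisted IP")
--         if any(susp_url in url for susp_url in suspicious_urls):
--             reasons.append("Suspicious URL")
--
--         if reasons:
--             entry["reason"] = ", ".join(reasons)
--             detected.append(entry)
--     return detected
-- ===== SOURCE B (Python) =====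
-- def detect_phishing(parsed_logs, blacklisted_ips, suspicious_urls):
--     # Staged sieve design: two index-collecting passes build hit sets, then one
--     # merge pass assembles the output consulting only the index sets.
--     blacklist = set(blacklisted_ips)
--     ip_hits = {i for i, e in enumerate(parsed_logs) if e.get("ip", "") in blacklist}
--     url_hits = {i for i, e in enumerate(parsed_logs)
--                 if any(s in e.get("url", "") for s in suspicious_urls)}
--     detected = []
--     for i, entry in enumerate(parsed_logs):
--         if i in ip_hits and i in url_hits:
--             entry["reason"] = "Blacklisted IP, Suspicious URL"
--         elif i in ip_hits:
--             entry["reason"] = "Blacklisted IP"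
--         elif i in url_hits:
--             entry["reason"] = "Suspicious URL"
--         else:
--             continue
--         detected.append(entry)
--     return detected
-- ===== Notes on version B (the rewrite author's own statement) =====
-- stated objective: alternative
-- what changed: B is a staged sieve: two separate enumerate passes collect the index sets of blacklisted-IP hits (against a set, not a list scan) and suspicious-URL hits, and a final merge pass builds the output by consulting only those index sets with an if/elif chain of fixed reason strings instead of A's per-entry reasons list plus ', '.join.
import Mathlib
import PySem

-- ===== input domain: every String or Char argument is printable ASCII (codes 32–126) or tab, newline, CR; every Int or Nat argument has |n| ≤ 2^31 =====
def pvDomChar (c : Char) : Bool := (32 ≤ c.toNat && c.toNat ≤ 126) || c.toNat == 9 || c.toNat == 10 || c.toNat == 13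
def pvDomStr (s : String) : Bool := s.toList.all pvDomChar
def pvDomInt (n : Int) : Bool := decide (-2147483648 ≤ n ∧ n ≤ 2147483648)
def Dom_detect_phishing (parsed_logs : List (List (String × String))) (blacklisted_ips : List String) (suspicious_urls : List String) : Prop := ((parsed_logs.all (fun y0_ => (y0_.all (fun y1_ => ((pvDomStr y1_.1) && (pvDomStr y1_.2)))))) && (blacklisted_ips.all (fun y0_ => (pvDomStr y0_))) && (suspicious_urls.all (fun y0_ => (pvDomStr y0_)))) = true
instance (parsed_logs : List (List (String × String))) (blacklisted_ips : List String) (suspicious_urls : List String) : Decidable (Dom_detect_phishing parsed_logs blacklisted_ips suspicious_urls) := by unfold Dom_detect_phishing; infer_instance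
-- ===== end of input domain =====

-- B is a staged sieve (two index-collecting passes building hit sets, then a merge pass with an
-- if/elif chain of fixed reason strings) instead of A's single pass with a reasons list + join
-- (objective: alternative). Both Pythons mutate the matched entry dicts in place (adding "reason");
-- the equivalence proved is about the return value.

-- ===== PORT A =====
def detect_phishing (parsed_logs : List (List (String × String))) (blacklisted_ips : List String) (suspicious_urls : List String) : List (List (String × String)) :=
  parsed_logs.foldl (fun detected entry =>
    let d : PySem.Dict String String := PySem.Dict.mk entry
    let ip := d.getD "ip" ""
    let url := d.getD "url" ""
    let reasons : List String := []
    let reasons := if blacklisted_ips.contains ip then reasons ++ ["Blacklisted IP"] else reasons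
    let reasons := if suspicious_urls.any (fun p => PySem.Str.isIn p url) then reasons ++ ["Suspicious URL"] else reasons
    if reasons ≠ [] then detected ++ [(d.insert "reason" (PySem.Str.join ", " reasons)).items]
    else detected) []

-- ===== PORT B =====
def detect_phishing_alt (parsed_logs : List (List (String × String))) (blacklisted_ips : List String) (suspicious_urls : List String) : List (List (String × String)) :=
  let blacklist : PySem.Set String := PySem.Set.ofList blacklisted_ips
  let ipHits : PySem.Set Int := PySem.Set.ofList
    (((PySem.List.enumerate parsed_logs 0).filter (fun p =>
        PySem.Set.contains blacklist ((PySem.Dict.mk p.2 : PySem.Dict String String).getD "ip" ""))).map Prod.fst)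
  let urlHits : PySem.Set Int := PySem.Set.ofList
    (((PySem.List.enumerate parsed_logs 0).filter (fun p =>
        suspicious_urls.any (fun s => PySem.Str.isIn s ((PySem.Dict.mk p.2 : PySem.Dict String String).getD "url" "")))).map Prod.fst)
  (PySem.List.enumerate parsed_logs 0).foldl (fun detected p =>
    let d : PySem.Dict String String := PySem.Dict.mk p.2
    if PySem.Set.contains ipHits p.1 && PySem.Set.contains urlHits p.1 then
      detected ++ [(d.insert "reason" "Blacklisted IP, Suspicious URL").items]
    else if PySem.Set.contains ipHits p.1 then
      detected ++ [(d.insert "reason" "Blacklisted IP").items]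
    else if PySem.Set.contains urlHits p.1 then
      detected ++ [(d.insert "reason" "Suspicious URL").items]
    else detected) []

-- ===== PRECONDITION & SPEC =====
def Spec_detect_phishing (parsed_logs : List (List (String × String))) (blacklisted_ips : List String) (suspicious_urls : List String) (out : List (List (String × String))) : Prop := out = detect_phishing_alt parsed_logs blacklisted_ips suspicious_urls
instance (parsed_logs : List (List (String × String))) (blacklisted_ips : List String) (suspicious_urls : List String) (out : List (List (String × String))) : Decidable (Spec_detect_phishing parsed_logs blacklisted_ips suspicious_urls out) := by unfold Spec_detect_phishing; infer_instance

-- ===== CLAIM (what is proved, stated in full; the proofs are below) =====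
def Claim_equal_detect_phishing : Prop := ∀ (parsed_logs : List (List (String × String))) (blacklisted_ips : List String) (suspicious_urls : List String), Dom_detect_phishing parsed_logs blacklisted_ips suspicious_urls → Spec_detect_phishing parsed_logs blacklisted_ips suspicious_urls (detect_phishing parsed_logs blacklisted_ips suspicious_urls)

-- ===== LEMMAS AND PROOFS =====

-- Set.contains decodes to membership.
theorem set_contains_iff {α : Type} [BEq α] [LawfulBEq α] (s : PySem.Set α) (x : α) :
    PySem.Set.contains s x = true ↔ x ∈ s := by
  simp [PySem.Set.contains]

theorem contains_ofList_eq (l : List String) (x : String) :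
    PySem.Set.contains (PySem.Set.ofList l) x = l.contains x := by
  rw [Bool.eq_iff_iff, set_contains_iff, PySem.Set.mem_ofList]
  simp

-- Membership in a hit index set decodes to the test on the entry at that index.
theorem hits_contains {α : Type} (xs : List α) (t : Int × α → Bool) (p : Int × α)
    (hp : p ∈ PySem.List.enumerate xs 0) :
    PySem.Set.contains (PySem.Set.ofList (((PySem.List.enumerate xs 0).filter t).map Prod.fst)) p.1 = t p := by
  obtain ⟨k, hk, rfl⟩ := (PySem.List.mem_enumerate_iff xs 0 p).1 hp
  rw [Bool.eq_iff_iff, set_contains_iff, PySem.Set.mem_ofList]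
  constructor
  · intro hx
    obtain ⟨q, hq, hq1⟩ := List.mem_map.1 hx
    have hqf := List.mem_filter.1 hq
    obtain ⟨j, hj, rfl⟩ := (PySem.List.mem_enumerate_iff xs 0 q).1 hqf.1
    have : j = k := by
      have : (j : Int) = (k : Int) := by simpa using hq1
      exact_mod_cast this
    subst this
    exact hqf.2
  · intro h
    exact List.mem_map.2 ⟨(0 + (k : Int), xs[k]), List.mem_filter.2 ⟨hp, h⟩, rfl⟩

theorem detect_phishing_eq_alt (parsed_logs : List (List (String × String))) (blacklisted_ips : List String) (suspicious_urls : List String) :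
    detect_phishing parsed_logs blacklisted_ips suspicious_urls = detect_phishing_alt parsed_logs blacklisted_ips suspicious_urls := by
  have hj1 : PySem.Str.join ", " ["Blacklisted IP"] = "Blacklisted IP" := by decide
  have hj2 : PySem.Str.join ", " ["Suspicious URL"] = "Suspicious URL" := by decide
  have hj12 : PySem.Str.join ", " ["Blacklisted IP", "Suspicious URL"] = "Blacklisted IP, Suspicious URL" := by decide
  unfold detect_phishing detect_phishing_alt
  rw [PySem.List.foldl_congr_mem' (g := fun (detected : List (List (String × String))) (p : Int × List (String × String)) =>
    let d : PySem.Dict String String := PySem.Dict.mk p.2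
    let ip := d.getD "ip" ""
    let url := d.getD "url" ""
    let reasons : List String := []
    let reasons := if blacklisted_ips.contains ip then reasons ++ ["Blacklisted IP"] else reasons
    let reasons := if suspicious_urls.any (fun q => PySem.Str.isIn q url) then reasons ++ ["Suspicious URL"] else reasons
    if reasons ≠ [] then detected ++ [(d.insert "reason" (PySem.Str.join ", " reasons)).items]
    else detected)]
  · conv_lhs => rw [← PySem.List.map_snd_enumerate parsed_logs 0, List.foldl_map]
  · intro p hp acc
    have h1 := hits_contains parsed_logs (fun p =>
      PySem.Set.contains (PySem.Set.ofList blacklisted_ips) ((PySem.Dict.mk p.2 : PySem.Dict String String).getD "ip" "")) p hp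
    have h2 := hits_contains parsed_logs (fun p =>
      suspicious_urls.any (fun s => PySem.Str.isIn s ((PySem.Dict.mk p.2 : PySem.Dict String String).getD "url" ""))) p hp
    simp only [h1, h2]
    simp only [contains_ofList_eq]
    by_cases hb : (PySem.Dict.mk p.2 : PySem.Dict String String).getD "ip" "" ∈ blacklisted_ips <;>
      by_cases hu : ∃ x ∈ suspicious_urls, PySem.Chars.isIn x.toList ((PySem.Dict.mk p.2 : PySem.Dict String String).getD "url" "").toList = true <;>
        simp [hb, hu, hj1, hj2, hj12]

-- ===== VERDICT (by name: the statement is the Claim_ definition above) =====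
theorem detect_phishing_spec : Claim_equal_detect_phishing := by
  intro parsed_logs blacklisted_ips suspicious_urls _
  exact detect_phishing_eq_alt parsed_logs blacklisted_ips suspicious_urls
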